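-- pv_equiv track=rewrite | github.com/Sourav-Tripathy/commitgen | commitgen/core/diff_processor.py | summarize_changes
-- ===== SOURCE A (Python) =====
-- from typing import List, Dict, Tuple
--
-- def summarize_changes(files: List[Tuple[str, str]]) -> str:
--     """
--     Create high-level summary of changes
--
--     Example output:
--     - Added: 3 files (authentication.py, user_model.py, test_auth.py)
--     - Modified: 2 files (config.py, README.md)
--     - Deleted: 1 file (legacy_auth.py)
--     """
--     added = []
--     modified = []
--     deleted = []
--     renamed = []
--
--     for f, change_type in files:
--         if change_type == 'A': added.append(f)
--         elif change_type == 'M': modified.append(f)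
--         elif change_type == 'D': deleted.append(f)
--         elif change_type == 'R': renamed.append(f)
--
--     summary = []
--     if added:
--         summary.append(f"- Added: {len(added)} files ({', '.join(added[:3])}{'...' if len(added)>3 else ''})")
--     if modified:
--          summary.append(f"- Modified: {len(modified)} files ({', '.join(modified[:3])}{'...' if len(modified)>3 else ''})")
--     if deleted:
--          summary.append(f"- Deleted: {len(deleted)} files ({', '.join(deleted[:3])}{'...' if len(deleted)>3 else ''})")
--     if renamed:
--          summary.append(f"- Renamed: {len(renamed)} files ({', '.join(renamed[:3])}{'...' if len(renamed)>3 else ''})")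
--
--     return "\n".join(summary)
-- ===== SOURCE B (Python) =====
-- CATEGORIES = [('A', '- Added: '), ('M', '- Modified: '), ('D', '- Deleted: '), ('R', '- Renamed: ')]
--
-- def summarize_changes(files):
--     lines = []
--     for code, prefix in CATEGORIES:
--         names = [f for f, t in files if t == code]
--         if names:
--             lines.append(f"{prefix}{len(names)} files ({', '.join(names[:3])}{'...' if len(names) > 3 else ''})")
--     return "\n".join(lines)
-- ===== Notes on version B (the rewrite author's own statement) =====
-- stated objective: idiomatic
-- what changed: Replaces the single distribution pass into four named lists plus four hardcoded formatting blocks by a data-driven loop over a (code, prefix) table, selecting each category's filenames with one comprehension and formatting in a single shared append.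
import Mathlib
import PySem

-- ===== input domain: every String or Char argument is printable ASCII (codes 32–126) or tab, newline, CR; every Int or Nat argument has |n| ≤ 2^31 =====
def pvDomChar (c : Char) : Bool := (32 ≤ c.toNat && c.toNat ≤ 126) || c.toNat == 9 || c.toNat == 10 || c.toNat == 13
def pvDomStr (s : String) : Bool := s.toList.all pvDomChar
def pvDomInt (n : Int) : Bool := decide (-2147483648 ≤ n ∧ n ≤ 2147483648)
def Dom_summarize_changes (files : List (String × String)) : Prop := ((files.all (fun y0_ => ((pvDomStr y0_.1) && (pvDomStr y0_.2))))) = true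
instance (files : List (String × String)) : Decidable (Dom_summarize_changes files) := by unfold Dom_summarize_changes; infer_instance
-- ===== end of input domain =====

-- B replaces A's four named lists and four hardcoded formatting blocks by one loop over a (code, prefix) table (idiomatic/table-driven); same return value.

-- shared transliteration of the f-string "{prefix}{len(names)} files ({', '.join(names[:3])}{'...' if len(names)>3 else ''})"
def pvLine (pre : String) (names : List String) : String :=
  pre ++ PySem.Int.toStr (names.length : Int) ++ " files (" ++
    PySem.Str.join ", " (PySem.List.slice names none (some 3)) ++
    (if names.length > 3 then "..." else "") ++ ")"

-- ===== PORT A =====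
def summarize_changes (files : List (String × String)) : String :=
  let acc := files.foldl
    (fun (acc : List String × List String × List String × List String) f =>
      if f.2 == "A" then (acc.1 ++ [f.1], acc.2.1, acc.2.2.1, acc.2.2.2)
      else if f.2 == "M" then (acc.1, acc.2.1 ++ [f.1], acc.2.2.1, acc.2.2.2)
      else if f.2 == "D" then (acc.1, acc.2.1, acc.2.2.1 ++ [f.1], acc.2.2.2)
      else if f.2 == "R" then (acc.1, acc.2.1, acc.2.2.1, acc.2.2.2 ++ [f.1])
      else acc)
    ([], [], [], [])
  let added := acc.1
  let modified := acc.2.1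
  let deleted := acc.2.2.1
  let renamed := acc.2.2.2
  let summary : List String := []
  let summary := if !added.isEmpty then summary ++ [pvLine "- Added: " added] else summary
  let summary := if !modified.isEmpty then summary ++ [pvLine "- Modified: " modified] else summary
  let summary := if !deleted.isEmpty then summary ++ [pvLine "- Deleted: " deleted] else summary
  let summary := if !renamed.isEmpty then summary ++ [pvLine "- Renamed: " renamed] else summary
  PySem.Str.join "\n" summary

-- ===== PORT B =====
def summarize_changes_alt (files : List (String × String)) : String :=
  let cats : List (String × String) :=
    [("A", "- Added: "), ("M", "- Modified: "), ("D", "- Deleted: "), ("R", "- Renamed: ")]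
  let lines := cats.foldl
    (fun (lines : List String) p =>
      let names := (files.filter (fun q => q.2 == p.1)).map (fun q => q.1)
      if !names.isEmpty then lines ++ [pvLine p.2 names] else lines)
    []
  PySem.Str.join "\n" lines

-- ===== PRECONDITION & SPEC =====
def Spec_summarize_changes (files : List (String × String)) (out : String) : Prop := out = summarize_changes_alt files
instance (files : List (String × String)) (out : String) : Decidable (Spec_summarize_changes files out) := by unfold Spec_summarize_changes; infer_instance

-- ===== CLAIM (what is proved, stated in full; the proofs are below) =====
def Claim_equal_summarize_changes : Prop := ∀ (files : List (String × String)), Dom_summarize_changes files → Spec_summarize_changes files (summarize_changes files)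

-- ===== LEMMAS AND PROOFS =====
def pvNames (files : List (String × String)) (c : String) : List String :=
  (files.filter (fun q => q.2 == c)).map (fun q => q.1)

lemma foldA_eq (files : List (String × String)) (a m d r : List String) :
    files.foldl
      (fun (acc : List String × List String × List String × List String) f =>
        if f.2 == "A" then (acc.1 ++ [f.1], acc.2.1, acc.2.2.1, acc.2.2.2)
        else if f.2 == "M" then (acc.1, acc.2.1 ++ [f.1], acc.2.2.1, acc.2.2.2)
        else if f.2 == "D" then (acc.1, acc.2.1, acc.2.2.1 ++ [f.1], acc.2.2.2)
        else if f.2 == "R" then (acc.1, acc.2.1, acc.2.2.1, acc.2.2.2 ++ [f.1])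
        else acc)
      (a, m, d, r)
    = (a ++ pvNames files "A", m ++ pvNames files "M",
       d ++ pvNames files "D", r ++ pvNames files "R") := by
  induction files generalizing a m d r with
  | nil => simp [pvNames]
  | cons f fs ih =>
    simp only [List.foldl_cons]
    simp only [beq_iff_eq] at ih
    by_cases hA : f.2 = "A"
    · simp [hA, ih, pvNames]
    · by_cases hM : f.2 = "M"
      · simp [hA, hM, ih, pvNames]
      · by_cases hD : f.2 = "D"
        · simp [hA, hM, hD, ih, pvNames]
        · by_cases hR : f.2 = "R"
          · simp [hA, hM, hR, hD, ih, pvNames]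
          · simp [hA, hM, hD, hR, ih, pvNames]

-- ===== VERDICT (by name: the statement is the Claim_ definition above) =====
theorem summarize_changes_spec : Claim_equal_summarize_changes := by
  intro files _
  show summarize_changes files = summarize_changes_alt files
  unfold summarize_changes summarize_changes_alt
  rw [foldA_eq]
  rfl
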